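-- pv_equiv track=rewrite | github.com/Sangwon91/fmp-palyground | scripts/get_companies_by_country.py | filter_companies_by_country
-- ===== SOURCE A (Python) =====
-- from typing import Dict, List
--
-- COUNTRY_EXCHANGES = {
--     'US': ['NYSE', 'NASDAQ', 'AMEX'],
--     'CN': ['SHH', 'SHZ'],
--     'JP': ['JPX'],
--     'KR': ['KSC', 'KOE']
-- }
--
-- def filter_companies_by_country(stocks: List[Dict], country_code: str) -> Dict[str, List[Dict]]:
--     """
--     주식 목록에서 특정 국가의 거래소별 기업 정보를 필터링합니다.
--
--     Parameters
--     ----------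
--     stocks : list
--         전체 주식 목록
--     country_code : str
--         국가 코드 (ISO 3166-1 alpha-2)
--
--     Returns
--     -------
--     dict
--         거래소별 기업 목록
--     """
--     if country_code not in COUNTRY_EXCHANGES:
--         raise ValueError(f'지원하지 않는 국가 코드입니다: {country_code}')
--
--     exchanges = COUNTRY_EXCHANGES[country_code]
--     companies_by_exchange = {exchange: [] for exchange in exchanges}
--
--     for stock in stocks:
--         exchange = stock.get('exchangeShortName', '')
--         type_ = stock.get('type', '')
--
--         if exchange in exchanges and type_ == 'stock':
--             companies_by_exchange[exchange].append(stock)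
--
--     return companies_by_exchange
-- ===== SOURCE B (Python) =====
-- from typing import Dict, List
--
-- COUNTRY_EXCHANGES = {
--     'US': ['NYSE', 'NASDAQ', 'AMEX'],
--     'CN': ['SHH', 'SHZ'],
--     'JP': ['JPX'],
--     'KR': ['KSC', 'KOE']
-- }
--
-- def filter_companies_by_country(stocks: List[Dict], country_code: str) -> Dict[str, List[Dict]]:
--     if country_code not in COUNTRY_EXCHANGES:
--         raise ValueError(f'지원하지 않는 국가 코드입니다: {country_code}')
--     return {
--         exchange: [s for s in stocks
--                    if s.get('exchangeShortName', '') == exchange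
--                    and s.get('type', '') == 'stock']
--         for exchange in COUNTRY_EXCHANGES[country_code]
--     }
-- ===== Notes on version B (the rewrite author's own statement) =====
-- stated objective: idiomatic
-- what changed: Replaces the single-pass bucket-dispatch loop (pre-built empty buckets mutated by append) with a dict comprehension that scans the stock list once per exchange with a filtering list comprehension.
import Mathlib
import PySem

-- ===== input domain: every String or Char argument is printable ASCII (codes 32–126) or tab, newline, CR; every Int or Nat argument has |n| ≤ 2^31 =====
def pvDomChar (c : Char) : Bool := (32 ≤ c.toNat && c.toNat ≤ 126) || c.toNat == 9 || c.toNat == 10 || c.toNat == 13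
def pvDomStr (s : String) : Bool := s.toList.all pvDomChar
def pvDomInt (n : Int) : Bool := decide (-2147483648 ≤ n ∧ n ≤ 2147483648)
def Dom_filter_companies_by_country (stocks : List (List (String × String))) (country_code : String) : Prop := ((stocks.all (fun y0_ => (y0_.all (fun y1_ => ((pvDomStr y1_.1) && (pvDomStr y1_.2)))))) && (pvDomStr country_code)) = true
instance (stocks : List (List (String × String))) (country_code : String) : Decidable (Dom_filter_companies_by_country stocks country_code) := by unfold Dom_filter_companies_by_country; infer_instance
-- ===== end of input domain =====

-- B replaces A's single-pass bucket-dispatch loop by an idiomatic dict comprehension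
-- filtering the stock list once per exchange; same return value on all supported country codes.

-- COUNTRY_EXCHANGES, shared module-level constant of both Pythons
def pvCountryExchanges : PySem.Dict String (List String) :=
  PySem.Dict.ofList [("US", ["NYSE", "NASDAQ", "AMEX"]), ("CN", ["SHH", "SHZ"]),
                     ("JP", ["JPX"]), ("KR", ["KSC", "KOE"])]

-- stock.get(k, '') — a stock is a Python dict, here an association list (first match)
def pvGet (s : List (String × String)) (k : String) : String := (PySem.Dict.mk s).getD k ""

-- ===== PORT A =====
def filter_companies_by_country (stocks : List (List (String × String))) (country_code : String) : List (String × List (List (String × String))) :=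
  match PySem.Dict.get? pvCountryExchanges country_code with
  | none => []  -- Python raises ValueError here; excluded by Pre_
  | some exchanges =>
    -- {exchange: [] for exchange in exchanges}: keys are distinct literals, so the
    -- comprehension builds exactly this association list
    let init : PySem.Dict String (List (List (String × String))) :=
      PySem.Dict.mk (exchanges.map (fun e => (e, [])))
    let final := stocks.foldl (fun d stock =>
      let ex := pvGet stock "exchangeShortName"
      let ty := pvGet stock "type"
      if exchanges.contains ex && ty == "stock"
      then d.modify ex [] (fun l => l ++ [stock]) else d) init
    final.items

-- ===== PORT B =====
def filter_companies_by_country_alt (stocks : List (List (String × String))) (country_code : String) : List (String × List (List (String × String))) :=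
  match PySem.Dict.get? pvCountryExchanges country_code with
  | none => []  -- Python raises ValueError here; excluded by Pre_
  | some exchanges =>
    -- dict comprehension over the distinct exchange literals = this association list
    exchanges.map (fun e =>
      (e, stocks.filter (fun s =>
            pvGet s "exchangeShortName" == e && pvGet s "type" == "stock")))

-- ===== PRECONDITION & SPEC =====
-- Pre_ excludes exactly the unsupported country codes, on which A raises ValueError (B too).
def Pre_filter_companies_by_country (stocks : List (List (String × String))) (country_code : String) : Prop :=
  country_code = "US" ∨ country_code = "CN" ∨ country_code = "JP" ∨ country_code = "KR"
instance (stocks : List (List (String × String))) (country_code : String) : Decidable (Pre_filter_companies_by_country stocks country_code) := by unfold Pre_filter_companies_by_country; infer_instance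

def pvWitness_filter_companies_by_country : (List (List (String × String))) × String :=
  ([[("exchangeShortName", "NYSE"), ("type", "stock")], [("type", "etf")]], "US")

def Spec_filter_companies_by_country (stocks : List (List (String × String))) (country_code : String) (out : List (String × List (List (String × String)))) : Prop := out = filter_companies_by_country_alt stocks country_code
instance (stocks : List (List (String × String))) (country_code : String) (out : List (String × List (List (String × String)))) : Decidable (Spec_filter_companies_by_country stocks country_code out) := by unfold Spec_filter_companies_by_country; infer_instance

-- ===== CLAIM (what is proved, stated in full; the proofs are below) =====
def Claim_equal_filter_companies_by_country : Prop := ∀ (stocks : List (List (String × String))) (country_code : String), Dom_filter_companies_by_country stocks country_code → Pre_filter_companies_by_country stocks country_code → Spec_filter_companies_by_country stocks country_code (filter_companies_by_country stocks country_code)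

-- ===== LEMMAS AND PROOFS =====

-- a dict whose keys are nodup is its key list paired with its getD values
theorem pv_items_eq_keys_map {ν : Type} (d : PySem.Dict String ν) (h : d.keys.Nodup) (dflt : ν) :
    d.items = d.keys.map (fun k => (k, d.getD k dflt)) := by
  have hpt : ∀ p ∈ d.items, (p.1, d.getD p.1 dflt) = p := by
    rintro ⟨k, v⟩ hp
    simp [PySem.Dict.getD_of_mem_items d hp h]
  conv_lhs => rw [← List.map_id d.items]
  simp only [PySem.Dict.keys, List.map_map]
  exact (List.map_congr_left (fun p hp => (hpt p hp).symm)).symm ▸ rfl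

-- the initial dict {e: [] for e in exchanges} answers [] on every key
theorem pv_getD_init (exchanges : List String) (e : String) :
    (PySem.Dict.mk (exchanges.map (fun x => (x, ([] : List (List (String × String))))))).getD e [] = [] := by
  induction exchanges with
  | nil => simp [PySem.Dict.getD, PySem.Dict.get?]
  | cons a t ih =>
    simp only [List.map_cons, PySem.Dict.getD_eq_get?_getD, PySem.Dict.get?_mk_cons] at *
    split <;> simp_all

-- getD of the append-to-bucket loop, by induction
theorem pv_getD_fold (P : List (List (String × String)))
    (d : PySem.Dict String (List (List (String × String)))) (e : String) :
    (P.foldl (fun d s => d.modify (pvGet s "exchangeShortName") [] (fun l => l ++ [s])) d).getD e []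
    = d.getD e [] ++ P.filter (fun s => pvGet s "exchangeShortName" == e) := by
  induction P generalizing d with
  | nil => simp
  | cons a t ih =>
    rw [List.foldl_cons, ih, PySem.Dict.getD_modify]
    by_cases hx : e = pvGet a "exchangeShortName"
    · simp [hx]
    · have : (pvGet a "exchangeShortName" == e) = false := by
        simp [beq_eq_false_iff_ne]; exact fun h => hx h.symm
      simp [hx, this]

-- the grouping loop, characterised bucket by bucket
theorem pv_main (exchanges : List String) (hnd : exchanges.Nodup)
    (stocks : List (List (String × String))) :
    (stocks.foldl (fun d stock =>
        if exchanges.contains (pvGet stock "exchangeShortName") && (pvGet stock "type" == "stock")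
        then d.modify (pvGet stock "exchangeShortName") [] (fun l => l ++ [stock]) else d)
      (PySem.Dict.mk (exchanges.map (fun e => (e, []))))).items
    = exchanges.map (fun e =>
        (e, stocks.filter (fun s =>
              pvGet s "exchangeShortName" == e && pvGet s "type" == "stock"))) := by
  rw [PySem.List.foldl_if_eq_foldl_filter]
  set P := stocks.filter
      (fun stock => exchanges.contains (pvGet stock "exchangeShortName") && (pvGet stock "type" == "stock"))
    with hP
  have hPmem : ∀ s ∈ P, exchanges.contains (pvGet s "exchangeShortName") = true ∧ pvGet s "type" = "stock" := by
    intro s hs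
    rw [hP, List.mem_filter] at hs
    have := hs.2
    simp only [Bool.and_eq_true, beq_iff_eq] at this
    exact this
  set init : PySem.Dict String (List (List (String × String))) :=
    PySem.Dict.mk (exchanges.map (fun e => (e, []))) with hinit
  set F := P.foldl (fun d s => d.modify (pvGet s "exchangeShortName") [] (fun l => l ++ [s])) init with hF
  have hkinit : init.keys = exchanges := by
    simp [hinit, PySem.Dict.keys, List.map_map, Function.comp_def]
  have hkeys : F.keys = exchanges := by
    have := PySem.Dict.keys_foldl_modify_key P (fun s => pvGet s "exchangeShortName")
      ([] : List (List (String × String))) (fun _ s => fun l => l ++ [s]) init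
    rw [hF, this, hkinit, PySem.Set.update_eq_append_filter]
    have hnil : List.filter (fun y => !PySem.Set.contains exchanges y)
        (PySem.Set.ofList (P.map (fun s => pvGet s "exchangeShortName"))) = [] := by
      rw [List.filter_eq_nil_iff]
      intro y hy
      have hy' : y ∈ P.map (fun s => pvGet s "exchangeShortName") := (PySem.Set.mem_ofList _ _).mp hy
      obtain ⟨s, hs, rfl⟩ := List.mem_map.mp hy'
      have hm : pvGet s "exchangeShortName" ∈ exchanges := List.contains_iff_mem.mp (hPmem s hs).1
      simp [PySem.Set.contains, hm]
    rw [hnil, List.append_nil]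
  rw [pv_items_eq_keys_map F (hkeys ▸ hnd) [], hkeys]
  apply List.map_congr_left
  intro e he
  have hgetD : F.getD e [] = stocks.filter (fun s =>
      pvGet s "exchangeShortName" == e && pvGet s "type" == "stock") := by
    rw [hF, pv_getD_fold, hinit, pv_getD_init, List.nil_append, hP, List.filter_filter]
    apply List.filter_congr
    intro s _
    by_cases hx : pvGet s "exchangeShortName" = e
    · simp [hx]
      exact fun _ => he
    · have hb : (pvGet s "exchangeShortName" == e) = false := by
        simp [beq_eq_false_iff_ne]; exact hx
      simp [hb]
  rw [hgetD]

-- ===== VERDICT (by name: the statement is the Claim_ definition above) =====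
theorem filter_companies_by_country_spec : Claim_equal_filter_companies_by_country := by
  intro stocks cc _ hpre
  unfold Spec_filter_companies_by_country
  have main := fun ex hnd => pv_main ex hnd stocks
  rcases hpre with h | h | h | h <;> subst h <;>
    simp only [filter_companies_by_country, filter_companies_by_country_alt] <;>
    exact main _ (by decide)
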